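-- pv_equiv track=rewrite | github.com/benquick123/code-profiling | code/batch-2/vse-naloge-brez-testov/DN7-M-160.py | polje_v_mine
-- ===== SOURCE A (Python) =====
-- def polje_v_mine(polje):
--     x = 0
--     y = 0
--     kord = set()
--     for znak in polje:
--         if znak == 'X':
--             kord.add((x, y))
--             x += 1
--         elif znak == ' ':
--             y += 1
--             x = 0
--         else:
--             x += 1
--
--     return kord,x,y+1
-- ===== SOURCE B (Python) =====
-- def polje_v_mine(polje):
--     rows = polje.split(' ')
--     kord = set()
--     for y, row in enumerate(rows):
--         for x, znak in enumerate(row):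
--             if znak == 'X':
--                 kord.add((x, y))
--     return kord, len(rows[-1]), len(rows)
-- ===== Notes on version B (the rewrite author's own statement) =====
-- stated objective: simpler
-- what changed: Replaced the manual x/y state machine over single characters by split(' ') followed by a nested enumerate over rows and row characters; the returned x is len(rows[-1]) and y+1 is len(rows).
import Mathlib
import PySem

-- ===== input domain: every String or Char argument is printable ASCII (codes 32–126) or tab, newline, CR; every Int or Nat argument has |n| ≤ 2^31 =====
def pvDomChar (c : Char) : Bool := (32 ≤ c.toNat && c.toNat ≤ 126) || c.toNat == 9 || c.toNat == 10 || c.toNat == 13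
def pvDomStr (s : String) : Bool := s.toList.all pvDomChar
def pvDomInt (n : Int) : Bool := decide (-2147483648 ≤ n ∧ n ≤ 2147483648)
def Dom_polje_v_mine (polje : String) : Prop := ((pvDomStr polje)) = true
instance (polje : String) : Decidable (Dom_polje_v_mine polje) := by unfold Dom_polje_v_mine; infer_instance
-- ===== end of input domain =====

-- B replaces A's manual x/y state machine by split(' ') plus a nested enumerate (objective: simpler).

-- ===== PORT A =====
-- single left-to-right pass over the characters with state (x, y, kord)
def polje_v_mine (polje : String) : (List (Int × Int)) × Int × Int :=
  let st := polje.toList.foldl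
    (fun (st : Int × Int × PySem.Set (Int × Int)) znak =>
      if znak = 'X' then (st.1 + 1, st.2.1, PySem.Set.add st.2.2 (st.1, st.2.1))
      else if znak = ' ' then (0, st.2.1 + 1, st.2.2)
      else (st.1 + 1, st.2.1, st.2.2))
    (0, 0, PySem.Set.empty)
  (st.2.2, st.1, st.2.1 + 1)

-- ===== PORT B =====
-- rows = polje.split(' '); nested enumerate; len(rows[-1]) and len(rows)
def polje_v_mine_alt (polje : String) : (List (Int × Int)) × Int × Int :=
  let rows := polje.toList.splitOn ' '
  let kord := (PySem.List.enumerate rows 0).foldl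
    (fun k yr =>
      (PySem.List.enumerate yr.2 0).foldl
        (fun k2 xz => if xz.2 = 'X' then PySem.Set.add k2 (xz.1, yr.1) else k2) k)
    PySem.Set.empty
  (kord, ((rows.getLastD []).length : Int), (rows.length : Int))

-- ===== PRECONDITION & SPEC =====
def Spec_polje_v_mine (polje : String) (out : (List (Int × Int)) × Int × Int) : Prop := out = polje_v_mine_alt polje
instance (polje : String) (out : (List (Int × Int)) × Int × Int) : Decidable (Spec_polje_v_mine polje out) := by unfold Spec_polje_v_mine; infer_instance

-- ===== CLAIM (what is proved, stated in full; the proofs are below) =====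
def Claim_equal_polje_v_mine : Prop := ∀ (polje : String), Dom_polje_v_mine polje → Spec_polje_v_mine polje (polje_v_mine polje)

-- ===== LEMMAS AND PROOFS =====

-- scan of one row starting at column x, on row index y (B's inner loop, start generalized)
def pvRowScan (r : List Char) (x y : Int) (k : PySem.Set (Int × Int)) : PySem.Set (Int × Int) :=
  (PySem.List.enumerate r x).foldl
    (fun k2 xz => if xz.2 = 'X' then PySem.Set.add k2 (xz.1, y) else k2) k

-- B's outer loop, with the first row starting at column x and row index y
def pvRowsScan : List (List Char) → Int → Int → PySem.Set (Int × Int) → PySem.Set (Int × Int)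
  | [], _, _, k => k
  | r :: rs, x, y, k => pvRowsScan rs 0 (y + 1) (pvRowScan r x y k)

lemma pvRowScan_cons (c : Char) (r : List Char) (x y : Int) (k : PySem.Set (Int × Int)) :
    pvRowScan (c :: r) x y k
      = pvRowScan r (x + 1) y (if c = 'X' then PySem.Set.add k (x, y) else k) := by
  simp [pvRowScan, PySem.List.enumerate_cons]

lemma pvRowScan_nil (x y : Int) (k : PySem.Set (Int × Int)) : pvRowScan [] x y k = k := by
  simp [pvRowScan, PySem.List.enumerate_nil]

-- B's enumerate-fold equals pvRowsScan with column offset 0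
lemma pv_enumFold_eq (rows : List (List Char)) (y : Int) (k : PySem.Set (Int × Int)) :
    (PySem.List.enumerate rows y).foldl
      (fun k yr =>
        (PySem.List.enumerate yr.2 0).foldl
          (fun k2 xz => if xz.2 = 'X' then PySem.Set.add k2 (xz.1, yr.1) else k2) k) k
    = pvRowsScan rows 0 y k := by
  induction rows generalizing y k with
  | nil => simp [pvRowsScan, PySem.List.enumerate_nil]
  | cons r rs ih => simp [PySem.List.enumerate_cons, pvRowsScan, ih, pvRowScan]

lemma pv_splitOn_ne_nil (cs : List Char) : cs.splitOn ' ' ≠ [] := by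
  simp [List.splitOn]
  exact List.splitOnP_ne_nil _ cs

-- core invariant: A's fold from state (x, y, k) described via splitOn
lemma pv_core (cs : List Char) (x y : Int) (k : PySem.Set (Int × Int)) :
    cs.foldl
      (fun (st : Int × Int × PySem.Set (Int × Int)) znak =>
        if znak = 'X' then (st.1 + 1, st.2.1, PySem.Set.add st.2.2 (st.1, st.2.1))
        else if znak = ' ' then (0, st.2.1 + 1, st.2.2)
        else (st.1 + 1, st.2.1, st.2.2))
      (x, y, k)
    = ((if (cs.splitOn ' ').length = 1 then x else 0) + (((cs.splitOn ' ').getLastD []).length : Int),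
       y + ((cs.splitOn ' ').length : Int) - 1,
       pvRowsScan (cs.splitOn ' ') x y k) := by
  induction cs generalizing x y k with
  | nil =>
      simp [List.splitOn, List.splitOnP_nil, pvRowsScan, pvRowScan_nil]
  | cons c t ih =>
      by_cases hsp : c = ' '
      · subst hsp
        have hr : ((' ' :: t).splitOn ' ') = [] :: t.splitOn ' ' := by
          simp [List.splitOn, List.splitOnP_cons]
        obtain ⟨r, rs, hrs⟩ : ∃ r rs, t.splitOn ' ' = r :: rs :=
          List.exists_cons_of_ne_nil (pv_splitOn_ne_nil t)
        have hX : (' ' : Char) ≠ 'X' := by decide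
        simp only [List.foldl_cons, if_neg hX, if_true]
        rw [ih 0 (y + 1) k, hr, hrs]
        rcases rs with _ | ⟨r2, rs'⟩
        · simp [pvRowsScan, pvRowScan_nil]; omega
        · simp [pvRowsScan, pvRowScan_nil]; omega
      · have hr : ((c :: t).splitOn ' ') = List.modifyHead (List.cons c) (t.splitOn ' ') := by
          simp [List.splitOn, List.splitOnP_cons, hsp]
        obtain ⟨r, rs, hrs⟩ : ∃ r rs, t.splitOn ' ' = r :: rs :=
          List.exists_cons_of_ne_nil (pv_splitOn_ne_nil t)
        simp only [List.foldl_cons]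
        have step :
            (if c = 'X' then (x + 1, y, PySem.Set.add k (x, y))
             else if c = ' ' then ((0 : Int), y + 1, k)
             else (x + 1, y, k))
            = (x + 1, y, if c = 'X' then PySem.Set.add k (x, y) else k) := by
          by_cases hX : c = 'X' <;> simp [hX, hsp]
        rw [step, ih (x + 1) y (if c = 'X' then PySem.Set.add k (x, y) else k), hr, hrs]
        rcases rs with _ | ⟨r2, rs'⟩
        · simp [pvRowsScan, pvRowScan_cons]; omega
        · simp [pvRowsScan, pvRowScan_cons]

-- ===== VERDICT (by name: the statement is the Claim_ definition above) =====
theorem polje_v_mine_spec : Claim_equal_polje_v_mine := by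
  intro polje _
  unfold Spec_polje_v_mine polje_v_mine polje_v_mine_alt
  dsimp only
  rw [pv_core polje.toList 0 0 PySem.Set.empty, pv_enumFold_eq]
  have h1 : (polje.toList.splitOn ' ').length ≠ 0 :=
    fun h => pv_splitOn_ne_nil polje.toList (List.eq_nil_of_length_eq_zero h)
  by_cases hone : (polje.toList.splitOn ' ').length = 1 <;> simp [hone]
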